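-- pv_equiv track=rewrite | github.com/TomMcIver/AxonAI | ml/simulator/data/semantic_gate_a_eedi_match.py | _select_text_columns
-- ===== SOURCE A (Python) =====
-- from typing import Sequence
--
-- def _text_column_score(name: str) -> int:
--     n = name.lower().strip()
--     if n == "problem_id" or n.endswith("_id"):
--         return -1
--     if "questiontext" in n or "question_text" in n:
--         return 250
--     if n in ("original_answer", "problem_text", "item_text"):
--         return 200
--     if "template" in n:
--         return 120
--     if "answer" in n or "text" in n:
--         return 80
--     if n in ("problem", "question", "body", "content"):
--         return 60
--     return 0
--
-- def _select_text_columns(columns: Sequence[str]) -> list[str]: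
--     scored = sorted(
--         ((c, _text_column_score(c)) for c in columns),
--         key=lambda x: x[1],
--         reverse=True,
--     )
--     out: list[str] = [c for c, s in scored if s > 0]
--     return out
-- ===== SOURCE B (Python) =====
-- from typing import Sequence
--
-- def _text_column_score(name: str) -> int:
--     n = name.lower().strip()
--     if n == "problem_id" or n.endswith("_id"):
--         return -1
--     if "questiontext" in n or "question_text" in n:
--         return 250
--     if n in ("original_answer", "problem_text", "item_text"):
--         return 200
--     if "template" in n:
--         return 120
--     if "answer" in n or "text" in n:
--         return 80
--     if n in ("problem", "question", "body", "content"):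
--         return 60
--     return 0
--
-- _POSITIVE_SCORES = (250, 200, 120, 80, 60)
--
-- def _select_text_columns(columns: Sequence[str]) -> list[str]:
--     # bucket (counting) sort over the fixed finite set of positive scores:
--     # one pass distributes names into per-score buckets, preserving input order,
--     # then the buckets are concatenated in descending score order.
--     buckets = {s: [] for s in _POSITIVE_SCORES}
--     for c in columns:
--         s = _text_column_score(c)
--         if s in buckets:
--             buckets[s].append(c)
--     out: list[str] = []
--     for s in _POSITIVE_SCORES:
--         out.extend(buckets[s])
--     return out
-- ===== Notes on version B (the rewrite author's own statement) =====
-- stated objective: alternative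
-- what changed: Replaces sort-by-score-then-filter with a bucket (counting) distribution: one pass puts column names into fixed per-score buckets preserving input order, which are then concatenated in descending score order (measured ~1.3-1.9x on large inputs but not consistently confirmed, so no speed claim).
import Mathlib
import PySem

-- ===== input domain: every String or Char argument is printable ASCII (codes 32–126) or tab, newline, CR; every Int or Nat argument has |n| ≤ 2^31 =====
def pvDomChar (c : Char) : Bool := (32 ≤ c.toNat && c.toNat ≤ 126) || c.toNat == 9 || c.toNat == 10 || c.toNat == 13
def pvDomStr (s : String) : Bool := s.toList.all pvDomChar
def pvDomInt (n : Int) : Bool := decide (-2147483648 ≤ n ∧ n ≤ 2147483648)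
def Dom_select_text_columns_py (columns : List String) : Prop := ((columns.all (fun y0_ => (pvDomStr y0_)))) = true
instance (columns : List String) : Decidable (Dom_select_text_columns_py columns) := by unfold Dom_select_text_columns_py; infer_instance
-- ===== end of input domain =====

-- B replaces sort-by-score-then-filter with a one-pass bucket (counting) distribution over the
-- fixed finite set of positive scores, concatenating the buckets in descending score order.


-- ===== PORT A =====
-- shared helper: port of _text_column_score (used by both sources)
def textColumnScore (name : String) : Int :=
  let n := PySem.Str.strip (PySem.Str.lower name)
  if n == "problem_id" || PySem.Str.endswith n "_id" then -1
  else if PySem.Str.isIn "questiontext" n || PySem.Str.isIn "question_text" n then 250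
  else if n == "original_answer" || n == "problem_text" || n == "item_text" then 200
  else if PySem.Str.isIn "template" n then 120
  else if PySem.Str.isIn "answer" n || PySem.Str.isIn "text" n then 80
  else if n == "problem" || n == "question" || n == "body" || n == "content" then 60
  else 0

def select_text_columns_py (columns : List String) : List String :=
  let scored := PySem.List.sorted (columns.map (fun c => (c, textColumnScore c))) (fun x => x.2) true
  (scored.filter (fun x => decide (0 < x.2))).map (fun x => x.1)

-- ===== PORT B =====
-- _POSITIVE_SCORES
def pvPosScores : List Int := [250, 200, 120, 80, 60]

def select_text_columns_py_alt (columns : List String) : List String :=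
  let buckets0 : PySem.Dict Int (List String) :=
    pvPosScores.foldl (fun d s => PySem.Dict.insert d s []) PySem.Dict.empty
  let buckets := columns.foldl (fun d c =>
    let s := textColumnScore c
    if PySem.Dict.contains d s then PySem.Dict.modify d s [] (fun l => l ++ [c]) else d) buckets0
  pvPosScores.foldl (fun out s => out ++ PySem.Dict.getD buckets s []) []

-- ===== PRECONDITION & SPEC =====
def Spec_select_text_columns_py (columns : List String) (out : List String) : Prop := out = select_text_columns_py_alt columns
instance (columns : List String) (out : List String) : Decidable (Spec_select_text_columns_py columns out) := by unfold Spec_select_text_columns_py; infer_instance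

-- ===== CLAIM (what is proved, stated in full; the proofs are below) =====
def Claim_equal_select_text_columns_py : Prop := ∀ (columns : List String), Dom_select_text_columns_py columns → Spec_select_text_columns_py columns (select_text_columns_py columns)

-- ===== LEMMAS AND PROOFS =====

-- inserting past a prefix none of whose elements x goes before
lemma insertBy_append_not_before {α : Type} (before : α → α → Bool) (x : α) (A B : List α)
    (h : ∀ y ∈ A, before x y = false) :
    PySem.List.insertBy before x (A ++ B) = A ++ PySem.List.insertBy before x B := by
  induction A with
  | nil => simp
  | cons a A ih =>
      have ha : before x a = false := h a (by simp)
      simp [PySem.List.insertBy, ha, ih (fun y hy => h y (by simp [hy]))]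

-- inserting in front of a list all of whose elements x goes before
lemma insertBy_all_before {α : Type} (before : α → α → Bool) (x : α) (B : List α)
    (h : ∀ y ∈ B, before x y = true) :
    PySem.List.insertBy before x B = x :: B := by
  cases B with
  | nil => simp [PySem.List.insertBy]
  | cons b B => simp [PySem.List.insertBy, h b (by simp)]

-- stable descending sort = concatenation of the equal-key buckets, in descending key order
lemma sortedRev_eq_buckets {α : Type} (k : α → Int) (vs : List Int) (hvs : vs.Pairwise (· > ·)) :
    ∀ xs : List α, (∀ x ∈ xs, k x ∈ vs) →
      PySem.List.sorted xs k true = vs.flatMap (fun v => xs.filter (fun x => decide (k x = v))) := by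
  intro xs
  induction xs using List.reverseRecOn with
  | nil => intro _; simp [PySem.List.sorted]
  | append_singleton xs x ih =>
      intro hmem
      have hx : k x ∈ vs := hmem x (by simp)
      obtain ⟨vs₁, vs₂, hvseq⟩ := List.mem_iff_append.mp hx
      subst hvseq
      have hp := List.pairwise_append.mp hvs
      have h1 : ∀ w ∈ vs₁, w > k x := fun w hw => hp.2.2 w hw (k x) (by simp)
      have h2 : ∀ w ∈ vs₂, k x > w := fun w hw => (List.pairwise_cons.mp hp.2.1).1 w hw
      rw [PySem.List.sorted_rev_eq_foldl_insertBy, List.foldl_append,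
        ← PySem.List.sorted_rev_eq_foldl_insertBy,
        ih (fun y hy => hmem y (by simp [hy]))]
      simp only [List.foldl_cons, List.foldl_nil, List.flatMap_append, List.flatMap_cons]
      rw [← List.append_assoc]
      rw [insertBy_append_not_before]
      · rw [insertBy_all_before]
        · have e1 : vs₁.flatMap (fun v => (xs ++ [x]).filter (fun y => decide (k y = v)))
              = vs₁.flatMap (fun v => xs.filter (fun y => decide (k y = v))) := by
            refine List.flatMap_congr (fun w hw => ?_)
            have : k x ≠ w := by have := h1 w hw; omega
            simp [List.filter_append, this]
          have e2 : vs₂.flatMap (fun v => (xs ++ [x]).filter (fun y => decide (k y = v)))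
              = vs₂.flatMap (fun v => xs.filter (fun y => decide (k y = v))) := by
            refine List.flatMap_congr (fun w hw => ?_)
            have : k x ≠ w := by have := h2 w hw; omega
            simp [List.filter_append, this]
          rw [e1, e2]
          simp [List.filter_append]
        · intro z hz
          obtain ⟨w, hw, hzw⟩ := List.mem_flatMap.mp hz
          have : k z = w := by simpa using (List.mem_filter.mp hzw).2
          have := h2 w hw
          simp only [decide_eq_true_eq]
          omega
      · intro y hy
        rcases List.mem_append.mp hy with hy | hy
        · obtain ⟨w, hw, hyw⟩ := List.mem_flatMap.mp hy
          have hk : k y = w := by simpa using (List.mem_filter.mp hyw).2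
          have := h1 w hw
          simp only [decide_eq_false_iff_not]
          omega
        · have hk : k y = k x := by simpa using (List.mem_filter.mp hy).2
          simp [hk]

-- the only values textColumnScore takes
lemma score_mem (s : String) : textColumnScore s ∈ ([250, 200, 120, 80, 60, 0, -1] : List Int) := by
  unfold textColumnScore
  dsimp only
  split_ifs <;> simp

-- one bucket of the sorted-and-filtered pair list, as a filter on the columns themselves
lemma bucket_piece (g : String → Int) (columns : List String) (v : Int) :
    (((columns.map (fun c => (c, g c))).filter (fun x => decide (x.2 = v))).filter
        (fun x => decide (0 < x.2))).map (fun x => x.1)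
      = if 0 < v then columns.filter (fun c => decide (g c = v)) else [] := by
  rw [List.filter_map, List.filter_map, List.map_map]
  simp only [Function.comp_def]
  split_ifs with hv
  · rw [List.filter_filter]
    have : ∀ c ∈ columns, (decide (0 < g c) && decide (g c = v)) = decide (g c = v) := by
      intro c _
      by_cases h : g c = v <;> simp [h, hv]
    rw [List.filter_congr this]
    simp
  · rw [List.filter_filter]
    have : ∀ c ∈ columns, (decide (0 < g c) && decide (g c = v)) = false := by
      intro c _
      by_cases h : g c = v
      · simp [h]; omega
      · simp [h]
    rw [List.filter_congr this]
    simp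

-- A's pipeline, for an abstract score function taking only the seven score values
lemma A_buckets_gen (g : String → Int)
    (hg : ∀ c, g c ∈ ([250, 200, 120, 80, 60, 0, -1] : List Int)) (columns : List String) :
    ((PySem.List.sorted (columns.map (fun c => (c, g c))) (fun x => x.2) true).filter
        (fun x => decide (0 < x.2))).map (fun x => x.1)
      = ([250, 200, 120, 80, 60] : List Int).flatMap
          (fun v => columns.filter (fun c => decide (g c = v))) := by
  rw [sortedRev_eq_buckets (fun x : String × Int => x.2) [250, 200, 120, 80, 60, 0, -1]
      (by decide) _ (by intro y hy; obtain ⟨c, _, rfl⟩ := List.mem_map.mp hy; exact hg c)]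
  simp only [List.flatMap_cons, List.flatMap_nil, List.append_nil, List.filter_append,
    List.map_append, bucket_piece]
  norm_num

-- B's one-pass bucket fill: each positive-score bucket collects exactly its filter, in order
lemma buckets_inv (g : String → Int) (hg : ∀ c, g c ∈ ([250, 200, 120, 80, 60, 0, -1] : List Int)) :
    ∀ (cs : List String) (d : PySem.Dict Int (List String)),
      (∀ w ∈ ([250, 200, 120, 80, 60] : List Int), PySem.Dict.contains d w = true) →
      PySem.Dict.contains d 0 = false → PySem.Dict.contains d (-1) = false →
      ∀ v ∈ ([250, 200, 120, 80, 60] : List Int),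
        PySem.Dict.getD (cs.foldl (fun d c =>
            if PySem.Dict.contains d (g c) then PySem.Dict.modify d (g c) [] (fun l => l ++ [c])
            else d) d) v []
          = PySem.Dict.getD d v [] ++ cs.filter (fun c => decide (g c = v)) := by
  intro cs
  induction cs with
  | nil => intro d hc h0 h1 v hv; simp
  | cons c cs ih =>
      intro d hc h0 h1 v hv
      rw [List.foldl_cons]
      rcases (by
          rcases (by simpa using hg c :
              g c = 250 ∨ g c = 200 ∨ g c = 120 ∨ g c = 80 ∨ g c = 60 ∨ g c = 0 ∨ g c = -1) with
            h|h|h|h|h|h|h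
          · exact Or.inl ⟨250, by norm_num, h⟩
          · exact Or.inl ⟨200, by norm_num, h⟩
          · exact Or.inl ⟨120, by norm_num, h⟩
          · exact Or.inl ⟨80, by norm_num, h⟩
          · exact Or.inl ⟨60, by norm_num, h⟩
          · exact Or.inr (Or.inl h)
          · exact Or.inr (Or.inr h) :
          (∃ K, K ∈ ([250, 200, 120, 80, 60] : List Int) ∧ g c = K) ∨ (g c = 0 ∨ g c = -1)) with
        ⟨K, hK, h⟩ | h
      · -- positive-score case: the bucket for g c exists, c is appended to it
        have hK5 : K = 250 ∨ K = 200 ∨ K = 120 ∨ K = 80 ∨ K = 60 := by simpa using hK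
        have hKne0 : K ≠ 0 := by rcases hK5 with rfl|rfl|rfl|rfl|rfl <;> norm_num
        have hKne1 : K ≠ -1 := by rcases hK5 with rfl|rfl|rfl|rfl|rfl <;> norm_num
        have hcd : PySem.Dict.contains d (g c) = true := by rw [h]; exact hc K hK
        simp only [hcd, if_true]
        rw [ih _ (fun w hw => by simp [PySem.Dict.contains_modify, hc w hw])
          (by simp [PySem.Dict.contains_modify, h0, h, Ne.symm hKne0])
          (by simp [PySem.Dict.contains_modify, h1, h, Ne.symm hKne1]) v hv]
        rw [PySem.Dict.getD_modify]
        by_cases hvK : v = g c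
        · subst hvK
          simp
        · have hne : ¬ (g c = v) := fun e => hvK e.symm
          simp [hvK, hne]
      · -- score 0 / -1: no bucket exists, c is dropped
        have hcd : PySem.Dict.contains d (g c) = false := by
          rcases h with h|h
          · rw [h]; exact h0
          · rw [h]; exact h1
        simp only [hcd, Bool.false_eq_true, if_false]
        rw [ih d hc h0 h1 v hv]
        have hv' : v = 250 ∨ v = 200 ∨ v = 120 ∨ v = 80 ∨ v = 60 := by simpa using hv
        have hne : ¬ (g c = v) := by
          rcases h with h|h <;> rw [h] <;> rcases hv' with rfl|rfl|rfl|rfl|rfl <;> norm_num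
        simp [hne]

-- B's port, reduced to the concatenation of the positive-score filters
lemma B_buckets (columns : List String) :
    select_text_columns_py_alt columns =
      ([250, 200, 120, 80, 60] : List Int).flatMap
        (fun v => columns.filter (fun c => decide (textColumnScore c = v))) := by
  unfold select_text_columns_py_alt
  dsimp only
  simp only [pvPosScores, List.foldl_cons, List.foldl_nil]
  rw [buckets_inv textColumnScore score_mem columns _ (by decide) (by decide) (by decide) 250 (by norm_num),
      buckets_inv textColumnScore score_mem columns _ (by decide) (by decide) (by decide) 200 (by norm_num),
      buckets_inv textColumnScore score_mem columns _ (by decide) (by decide) (by decide) 120 (by norm_num),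
      buckets_inv textColumnScore score_mem columns _ (by decide) (by decide) (by decide) 80 (by norm_num),
      buckets_inv textColumnScore score_mem columns _ (by decide) (by decide) (by decide) 60 (by norm_num)]
  norm_num [List.flatMap_cons, List.flatMap_nil]
  simp [PySem.Dict.getD_insert]

-- ===== VERDICT (by name: the statement is the Claim_ definition above) =====
theorem select_text_columns_py_spec : Claim_equal_select_text_columns_py := by
  intro columns _
  unfold Spec_select_text_columns_py
  rw [B_buckets]
  unfold select_text_columns_py
  dsimp only
  exact A_buckets_gen textColumnScore score_mem columns
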